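-- pv_equiv track=rewrite | github.com/Shayan-02/python_exercises | quera/maghsoom.py | divisor_count_and_sum
-- ===== SOURCE A (Python) =====
-- def divisor_count_and_sum(n):
--     total_count = 0
--     total_sum = 0
--
--     for i in range(1, n + 1):
--         for j in range(1, i + 1):
--             if i % j == 0:
--                 total_count += 1
--                 total_sum += j
--
--     return total_count, total_sum
-- ===== SOURCE B (Python) =====
-- def divisor_count_and_sum(n):
--     total_count = 0
--     total_sum = 0
--     j = 1
--     while j <= n:
--         k = n // j
--         total_count += k
--         total_sum += j * k
--         j += 1
--     return total_count, total_sum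
-- ===== Notes on version B (the rewrite author's own statement) =====
-- stated objective: faster
-- what changed: Instead of scanning all pairs (i, j) with a divisibility test, B runs a single while loop over candidate divisors j: j divides exactly floor(n/j) of the numbers 1..n, so it adds n//j to the count and j*(n//j) to the sum.
import Mathlib
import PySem

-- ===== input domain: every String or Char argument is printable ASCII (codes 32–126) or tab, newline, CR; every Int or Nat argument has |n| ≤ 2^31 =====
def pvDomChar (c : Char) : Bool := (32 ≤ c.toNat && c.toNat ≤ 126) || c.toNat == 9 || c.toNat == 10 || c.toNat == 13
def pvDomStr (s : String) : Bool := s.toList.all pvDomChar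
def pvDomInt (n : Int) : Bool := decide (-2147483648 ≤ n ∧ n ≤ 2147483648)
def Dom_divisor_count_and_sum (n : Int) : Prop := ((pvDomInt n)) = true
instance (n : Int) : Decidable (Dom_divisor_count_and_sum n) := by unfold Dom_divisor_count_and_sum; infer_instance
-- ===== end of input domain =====

-- B replaces A's quadratic nested pair scan by a single while loop over divisors j, each
-- contributing floor(n/j) to the count and j*floor(n/j) to the sum (objective: faster, asymptotic).

-- ===== PORT A =====
def divisor_count_and_sum (n : Int) : List Int :=
  let st :=
    (PySem.List.pyRange 1 (n + 1) 1).foldl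
      (fun (acc : Int × Int) i =>
        (PySem.List.pyRange 1 (i + 1) 1).foldl
          (fun (acc2 : Int × Int) j =>
            if PySem.Int.mod i j = 0 then (acc2.1 + 1, acc2.2 + j) else acc2)
          acc)
      (0, 0)
  [st.1, st.2]

-- ===== PORT B =====
-- Source B's 'while j <= n' loop, as fuel recursion: with j starting at 1 and incremented by 1,
-- the loop body runs exactly max(n, 0) = n.toNat times.
def pvBLoop (n : Int) (fuel : Nat) (j cnt s : Int) : Int × Int :=
  match fuel with
  | 0 => (cnt, s)
  | Nat.succ f =>
    let k := PySem.Int.floordiv n j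
    pvBLoop n f (j + 1) (cnt + k) (s + j * k)

def divisor_count_and_sum_alt (n : Int) : List Int :=
  let st := pvBLoop n n.toNat 1 0 0
  [st.1, st.2]

-- ===== PRECONDITION & SPEC =====
def Spec_divisor_count_and_sum (n : Int) (out : List Int) : Prop := out = divisor_count_and_sum_alt n
instance (n : Int) (out : List Int) : Decidable (Spec_divisor_count_and_sum n out) := by unfold Spec_divisor_count_and_sum; infer_instance

-- ===== CLAIM (what is proved, stated in full; the proofs are below) =====
def Claim_equal_divisor_count_and_sum : Prop := ∀ (n : Int), Dom_divisor_count_and_sum n → Spec_divisor_count_and_sum n (divisor_count_and_sum n)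

-- ===== LEMMAS AND PROOFS =====

-- generic fold-to-sum shape
theorem pv_foldl_addf (l : List Int) (g : Int → Int) : ∀ a : Int,
    l.foldl (fun a x => a + g x) a = a + (l.map g).sum := by
  induction l with
  | nil => intro a; simp
  | cons x t ih => intro a; simp [List.foldl_cons, ih (a + g x)]; ring

-- an 'if p then a + f j else a' accumulator is a sum of ites
theorem pv_foldl_iteadd (l : List Int) (p : Int → Prop) [DecidablePred p] (f : Int → Int) (a : Int) :
    l.foldl (fun a j => if p j then a + f j else a) a
      = a + (l.map (fun j => if p j then f j else 0)).sum := by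
  have h : (fun (a j : Int) => if p j then a + f j else a)
      = fun a j => a + (if p j then f j else 0) := by
    funext a j; split_ifs <;> simp
  rw [h, pv_foldl_addf]

-- sum of a pointwise addition of maps splits
theorem pv_sum_map_add (l : List Int) (g h : Int → Int) :
    (l.map (fun j => g j + h j)).sum = (l.map g).sum + (l.map h).sum := by
  induction l with
  | nil => simp
  | cons x t ih => simp [ih]; ring

-- inner sum of A for a weight f, as a map-sum
def pvInner (f : Int → Int) (i : Int) : Int :=
  ((PySem.List.pyRange 1 (i + 1) 1).map
    (fun j => if PySem.Int.mod i j = 0 then f j else 0)).sum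

-- key: A's nested sum equals the divisor-counting sum, for any weight f
theorem pv_key (m : Nat) (f : Int → Int) :
    ((PySem.List.pyRange 1 ((m : Int) + 1) 1).map (pvInner f)).sum
      = ((PySem.List.pyRange 1 ((m : Int) + 1) 1).map
          (fun j => PySem.Int.floordiv (m : Int) j * f j)).sum := by
  induction m with
  | zero => simp [PySem.List.pyRange_one_eq_nil]
  | succ m ih =>
    have hsplit : PySem.List.pyRange 1 ((m : Int) + 1 + 1) 1
        = PySem.List.pyRange 1 ((m : Int) + 1) 1 ++ [(m : Int) + 1] :=
      PySem.List.pyRange_one_succ_right (by omega)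
    have hm1 : (((m + 1 : Nat)) : Int) = (m : Int) + 1 := by push_cast; ring
    have hpt : ∀ j ∈ PySem.List.pyRange 1 ((m : Int) + 1) 1,
        PySem.Int.floordiv ((m : Int) + 1) j * f j
          = PySem.Int.floordiv (m : Int) j * f j
            + (if PySem.Int.mod ((m : Int) + 1) j = 0 then f j else 0) := by
      intro j hj
      rw [PySem.List.mem_pyRange_one] at hj
      obtain ⟨k, rfl⟩ : ∃ k : Nat, j = (k : Int) := ⟨j.toNat, by omega⟩
      rw [← hm1, PySem.Int.floordiv_natCast, PySem.Int.floordiv_natCast]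
      have hdvd : (PySem.Int.mod (((m + 1 : Nat)) : Int) (k : Int) = 0) ↔ (k ∣ (m + 1)) := by
        rw [PySem.Int.mod_eq_zero_iff_dvd]
        exact Int.natCast_dvd_natCast
      rw [Nat.succ_div]
      by_cases hd : k ∣ (m + 1)
      · rw [if_pos (hdvd.mpr hd)]; push_cast [hd]; ring
      · rw [if_neg (fun h => hd (hdvd.mp h))]; push_cast [Nat.succ_div, hd]; ring
    have hlast : pvInner f ((m : Int) + 1)
        = ((PySem.List.pyRange 1 ((m : Int) + 1) 1).map
            (fun j => if PySem.Int.mod ((m : Int) + 1) j = 0 then f j else 0)).sum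
          + f ((m : Int) + 1) := by
      unfold pvInner
      rw [hsplit, List.map_append, List.sum_append]
      simp
    have hfd : PySem.Int.floordiv ((m : Int) + 1) ((m : Int) + 1) = 1 := by
      rw [PySem.Int.floordiv_eq_ediv_of_pos (by omega)]
      exact Int.ediv_self (by omega)
    rw [show (((m + 1 : Nat)) : Int) + 1 = (m : Int) + 1 + 1 by push_cast; ring, hsplit,
      List.map_append, List.map_append, List.sum_append, List.sum_append, ih]
    simp only [hm1]
    rw [List.map_congr_left hpt, pv_sum_map_add]
    simp only [List.map_cons, List.map_nil, List.sum_cons, List.sum_nil, hfd, hlast]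
    ring

-- A's fold in closed map-sum form
theorem pv_A_char (n : Int) :
    divisor_count_and_sum n
      = [((PySem.List.pyRange 1 (n + 1) 1).map (pvInner (fun _ => 1))).sum,
         ((PySem.List.pyRange 1 (n + 1) 1).map (pvInner (fun j => j))).sum] := by
  unfold divisor_count_and_sum
  have h1 : ∀ (i : Int) (acc : Int × Int),
      (PySem.List.pyRange 1 (i + 1) 1).foldl
        (fun (acc2 : Int × Int) j =>
          if PySem.Int.mod i j = 0 then (acc2.1 + 1, acc2.2 + j) else acc2) acc
      = (acc.1 + pvInner (fun _ => 1) i, acc.2 + pvInner (fun j => j) i) := by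
    intro i acc
    have hsplitf : (fun (acc2 : Int × Int) (j : Int) =>
        if PySem.Int.mod i j = 0 then (acc2.1 + 1, acc2.2 + j) else acc2)
        = fun acc2 j => ((if PySem.Int.mod i j = 0 then acc2.1 + 1 else acc2.1),
                         (if PySem.Int.mod i j = 0 then acc2.2 + j else acc2.2)) := by
      funext acc2 j; split_ifs <;> rfl
    rw [hsplitf]
    rw [show acc = (acc.1, acc.2) from rfl,
      PySem.List.foldl_prod_mk
        (f := fun a j => if PySem.Int.mod i j = 0 then a + 1 else a)
        (g := fun a j => if PySem.Int.mod i j = 0 then a + j else a)]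
    rw [pv_foldl_iteadd _ _ (fun _ => 1), pv_foldl_iteadd _ _ (fun j => j)]
    simp [pvInner]
  have h2 : ∀ (l : List Int) (acc : Int × Int),
      l.foldl (fun (acc : Int × Int) i =>
        (PySem.List.pyRange 1 (i + 1) 1).foldl
          (fun (acc2 : Int × Int) j =>
            if PySem.Int.mod i j = 0 then (acc2.1 + 1, acc2.2 + j) else acc2) acc) acc
      = (acc.1 + (l.map (pvInner (fun _ => 1))).sum, acc.2 + (l.map (pvInner (fun j => j))).sum) := by
    intro l
    induction l with
    | nil => intro acc; simp
    | cons x t ih =>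
      intro acc
      rw [List.foldl_cons, h1 x acc, ih]
      simp; constructor <;> ring
  rw [h2]
  simp

-- B's while-loop recursion in closed map-sum form over the range it traverses
theorem pv_BLoop_char (n : Int) (m : Nat) : ∀ (j c s : Int),
    pvBLoop n m j c s
      = (c + ((PySem.List.pyRange j (j + m) 1).map (fun x => PySem.Int.floordiv n x)).sum,
         s + ((PySem.List.pyRange j (j + m) 1).map (fun x => x * PySem.Int.floordiv n x)).sum) := by
  induction m with
  | zero =>
    intro j c s
    rw [PySem.List.pyRange_one_eq_nil (by omega)]
    simp [pvBLoop]
  | succ f ih =>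
    intro j c s
    have hcons : PySem.List.pyRange j (j + (f + 1 : Nat)) 1
        = j :: PySem.List.pyRange (j + 1) (j + (f + 1 : Nat)) 1 :=
      PySem.List.pyRange_one_cons (by push_cast; omega)
    have hend : j + ((f + 1 : Nat) : Int) = (j + 1) + (f : Nat) := by push_cast; ring
    rw [pvBLoop, ih (j + 1) (c + PySem.Int.floordiv n j) (s + j * PySem.Int.floordiv n j),
      hcons, List.map_cons, List.map_cons, List.sum_cons, List.sum_cons, hend]
    simp only [Prod.mk.injEq]
    constructor <;> ring

-- B's port in closed map-sum form
theorem pv_B_char (n : Int) :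
    divisor_count_and_sum_alt n
      = [((PySem.List.pyRange 1 (n + 1) 1).map (fun j => PySem.Int.floordiv n j)).sum,
         ((PySem.List.pyRange 1 (n + 1) 1).map (fun j => j * PySem.Int.floordiv n j)).sum] := by
  unfold divisor_count_and_sum_alt
  rw [pv_BLoop_char n n.toNat 1 0 0]
  by_cases hn : n ≤ 0
  · rw [show n.toNat = 0 by omega,
      PySem.List.pyRange_one_eq_nil (a := (1 : Int)) (b := 1 + ((0 : Nat) : Int)) (by simp),
      PySem.List.pyRange_one_eq_nil (a := (1 : Int)) (b := n + 1) (by omega)]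
    simp
  · rw [show (1 : Int) + (n.toNat : Int) = n + 1 by omega]
    simp

-- ===== VERDICT (by name: the statement is the Claim_ definition above) =====
theorem divisor_count_and_sum_spec : Claim_equal_divisor_count_and_sum := by
  intro n _
  unfold Spec_divisor_count_and_sum
  rw [pv_A_char, pv_B_char]
  by_cases hn : n ≤ 0
  · rw [PySem.List.pyRange_one_eq_nil (by omega)]; simp
  · obtain ⟨m, rfl⟩ : ∃ m : Nat, n = (m : Int) := ⟨n.toNat, by omega⟩
    rw [pv_key m (fun _ => 1), pv_key m (fun j => j)]
    congr 1
    · exact congrArg List.sum (List.map_congr_left (fun j _ => by ring))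
    · congr 1
      exact congrArg List.sum (List.map_congr_left (fun j _ => by ring))
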